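-- pv_equiv track=rewrite | github.com/aawab/GenAITools | HW1/a1_p1_mahmood_113472709.py | spacelessBPETokenize
-- ===== SOURCE A (Python) =====
-- def spacelessBPETokenize(text: str, vocab):
--     """
--     Tokenizes text using a spaceless BPE tokenizer.
--
--     Args:
--         text: A single string to be word tokenized
--         vocab: A set of valid vocabulary words
--
--     Returns:
--         A list of strings of all word tokens, in order, from the string
--     """
--     # Replace non-ASCII characters with '?'
--     text = ''.join(c if c.isascii() else '?' for c in text)
--
--     # Split by whitespace to get words
--     raw_words = text.split()
--     result = []
--
--     # Process each word
--     for word in raw_words: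
--         # Initialize with characters
--         chars = list(word)
--
--         # Apply BPE merges until no more can be applied
--         while True:
--             # Find all pairs
--             pairs = [(chars[i], chars[i+1]) for i in range(len(chars) - 1)]
--
--             # Find valid merges based on vocabulary
--             valid_merges = [(i, ''.join(pairs[i])) for i in range(len(pairs)) if ''.join(pairs[i]) in vocab]
--
--             if not valid_merges:
--                 break
--
--             # Apply the first valid merge (leftmost)
--             pos, merged = valid_merges[0]
--             new_chars = chars[:pos] + [merged] + chars[pos+2:]
--             chars = new_chars
--
--         # Add the tokenized word to the result
--         result.extend(chars)
--
--     return result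
-- ===== SOURCE B (Python) =====
-- def spacelessBPETokenize(text: str, vocab):
--     # Single left-to-right stack pass per word: O(n) amortized instead of
--     # rescanning the whole word after every merge.
--     text = ''.join(c if c.isascii() else '?' for c in text)
--     result = []
--     for word in text.split():
--         stack = []
--         for c in word:
--             tok = c
--             while stack and stack[-1] + tok in vocab:
--                 tok = stack.pop() + tok
--             stack.append(tok)
--         result.extend(stack)
--     return result
-- ===== Notes on version B (the rewrite author's own statement) =====
-- stated objective: faster
-- what changed: A rebuilds the full pair list and rescans the whole word from scratch after every single merge; B does one left-to-right pass per word with a stack, merging the top pair while its join is in the vocabulary.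
import Mathlib
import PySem

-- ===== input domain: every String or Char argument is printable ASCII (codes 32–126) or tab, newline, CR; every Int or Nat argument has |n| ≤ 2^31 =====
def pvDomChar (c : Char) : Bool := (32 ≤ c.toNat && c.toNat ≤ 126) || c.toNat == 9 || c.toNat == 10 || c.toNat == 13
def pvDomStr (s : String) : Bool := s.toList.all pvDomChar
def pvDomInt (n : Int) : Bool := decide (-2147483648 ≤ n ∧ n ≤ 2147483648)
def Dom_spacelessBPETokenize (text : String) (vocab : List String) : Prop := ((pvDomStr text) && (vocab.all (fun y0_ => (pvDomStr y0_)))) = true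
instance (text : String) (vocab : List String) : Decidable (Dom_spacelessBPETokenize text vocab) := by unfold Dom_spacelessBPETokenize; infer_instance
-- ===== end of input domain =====

-- B replaces A's rescan-from-scratch leftmost-merge loop by a single stack pass per word (same return value).

-- ===== PORT A =====
-- ''.join(c if c.isascii() else '?' for c in text)
def pvAsciiFix (text : String) : String :=
  String.ofList (text.toList.map (fun c => if c.toNat ≤ 127 then c else '?'))

-- pairs = [(chars[i], chars[i+1]) for i in range(len(chars) - 1)]
def pvPairs : List String → List (String × String)
  | a :: b :: rest => (a, b) :: pvPairs (b :: rest)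
  | _ => []

-- valid_merges = [(i, ''.join(pairs[i])) for i in range(len(pairs)) if ''.join(pairs[i]) in vocab]
def pvValidMerges (vocab : List String) : Nat → List (String × String) → List (Nat × String)
  | _, [] => []
  | i, p :: ps =>
      if vocab.contains (p.1 ++ p.2) then (i, p.1 ++ p.2) :: pvValidMerges vocab (i + 1) ps
      else pvValidMerges vocab (i + 1) ps

theorem pvValidMerges_pos_lt {vocab : List String} {i : Nat} {ps : List (String × String)}
    {pos : Nat} {m : String} (h : (pos, m) ∈ pvValidMerges vocab i ps) :
    i ≤ pos ∧ pos < i + ps.length := by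
  induction ps generalizing i with
  | nil => simp [pvValidMerges] at h
  | cons p ps ih =>
      simp only [pvValidMerges, List.length_cons] at h ⊢
      split at h
      · rcases List.mem_cons.mp h with h | h
        · obtain ⟨h1, _⟩ := Prod.mk.inj h
          omega
        · have := ih h; omega
      · have := ih h; omega

theorem pvPairs_length (l : List String) : (pvPairs l).length = l.length - 1 := by
  induction l with
  | nil => simp [pvPairs]
  | cons a l ih =>
      cases l with
      | nil => simp [pvPairs]
      | cons b r => simpa [pvPairs] using ih

-- the while-loop of A: merge the leftmost valid pair until none exists
def pvBPELoop (vocab : List String) (chars : List String) : List String :=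
  match h : pvValidMerges vocab 0 (pvPairs chars) with
  | [] => chars
  | (pos, merged) :: _ =>
      have hlt : pos < chars.length - 1 := by
        have h1 := pvValidMerges_pos_lt (h ▸ List.mem_cons_self (l := _))
        have h2 := pvPairs_length chars
        omega
      pvBPELoop vocab (chars.take pos ++ [merged] ++ chars.drop (pos + 2))
termination_by chars.length
decreasing_by
  simp only [List.length_append, List.length_take, List.length_drop, List.length_cons,
    List.length_nil]
  omega

def spacelessBPETokenize (text : String) (vocab : List String) : List String :=
  let text := pvAsciiFix text
  let rawWords := PySem.Str.split₀ text
  rawWords.foldl (fun result word =>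
    result ++ pvBPELoop vocab (word.toList.map (fun c => String.ofList [c]))) []

-- ===== PORT B =====
-- push one character token onto the stack (head = top), merging with the top while the join is in vocab
def pvStackPush (vocab : List String) : List String → String → List String
  | [], tok => [tok]
  | t :: rest, tok =>
      if vocab.contains (t ++ tok) then pvStackPush vocab rest (t ++ tok)
      else tok :: t :: rest

def spacelessBPETokenize_alt (text : String) (vocab : List String) : List String :=
  let text := pvAsciiFix text
  (PySem.Str.split₀ text).foldl (fun result word =>
    result ++ ((word.toList.map (fun c => String.ofList [c])).foldl (pvStackPush vocab) []).reverse) []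

-- ===== PRECONDITION & SPEC =====
def Spec_spacelessBPETokenize (text : String) (vocab : List String) (out : List String) : Prop := out = spacelessBPETokenize_alt text vocab
instance (text : String) (vocab : List String) (out : List String) : Decidable (Spec_spacelessBPETokenize text vocab out) := by unfold Spec_spacelessBPETokenize; infer_instance

-- ===== CLAIM (what is proved, stated in full; the proofs are below) =====
def Claim_equal_spacelessBPETokenize : Prop := ∀ (text : String) (vocab : List String), Dom_spacelessBPETokenize text vocab → Spec_spacelessBPETokenize text vocab (spacelessBPETokenize text vocab)

-- ===== LEMMAS AND PROOFS =====

-- no two adjacent tokens of l can be merged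
def NoPair (vocab : List String) (l : List String) : Prop :=
  List.IsChain (fun a b => vocab.contains (a ++ b) = false) l

theorem pvValidMerges_nil_of_noPair {vocab : List String} {l : List String}
    (h : NoPair vocab l) (i : Nat) : pvValidMerges vocab i (pvPairs l) = [] := by
  induction l generalizing i with
  | nil => simp [pvPairs, pvValidMerges]
  | cons a l ih =>
      cases l with
      | nil => simp [pvPairs, pvValidMerges]
      | cons b r =>
          obtain ⟨h1, h2⟩ := List.isChain_cons_cons.mp h
          have h1' : a ++ b ∉ vocab := by simpa using h1
          simp [pvPairs, pvValidMerges, h1', ih h2]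

theorem pvValidMerges_head {vocab : List String} {l : List String} {t c : String}
    (hnp : NoPair vocab (l ++ [t])) (hc : vocab.contains (t ++ c) = true)
    (cs : List String) (i : Nat) :
    ∃ rest, pvValidMerges vocab i (pvPairs (l ++ t :: c :: cs)) = (i + l.length, t ++ c) :: rest := by
  induction l generalizing i with
  | nil =>
      refine ⟨pvValidMerges vocab (i + 1) (pvPairs (c :: cs)), ?_⟩
      have hc' : t ++ c ∈ vocab := by simpa using hc
      simp [pvPairs, pvValidMerges, hc']
  | cons a l ih =>
      have h1 : vocab.contains (a ++ (l ++ [t]).headD t) = false := by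
        cases l with
        | nil => exact (List.isChain_cons_cons.mp hnp).1
        | cons x xs => exact (List.isChain_cons_cons.mp hnp).1
      have hnp' : NoPair vocab (l ++ [t]) := by
        cases l with
        | nil => exact (List.isChain_cons_cons.mp hnp).2
        | cons x xs => exact (List.isChain_cons_cons.mp hnp).2
      obtain ⟨rest, hrest⟩ := ih hnp' (i + 1)
      refine ⟨rest, ?_⟩
      have hp : pvPairs (a :: (l ++ t :: c :: cs)) =
          (a, (l ++ [t]).headD t) :: pvPairs (l ++ t :: c :: cs) := by
        cases l <;> simp [pvPairs]
      simp only [List.cons_append, hp, pvValidMerges, h1, Bool.false_eq_true, if_false, hrest,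
        List.length_cons]
      congr 2
      omega

theorem pvStackPush_main (vocab : List String) (cs : List String) (s : List String)
    (hnp : NoPair vocab s.reverse) :
    pvBPELoop vocab (s.reverse ++ cs) = (cs.foldl (pvStackPush vocab) s).reverse := by
  induction hm : 2 * cs.length + s.length using Nat.strong_induction_on generalizing cs s with
  | _ n ih =>
  cases cs with
  | nil =>
      simp only [List.foldl_nil, List.append_nil]
      rw [pvBPELoop]
      split
      · rfl
      · next pos merged rest h =>
          rw [pvValidMerges_nil_of_noPair hnp 0] at h
          exact absurd h (by simp)
  | cons c cs' =>
      cases s with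
      | nil =>
          simp only [List.reverse_nil, List.nil_append, List.foldl_cons]
          have hp : pvStackPush vocab [] c = [c] := rfl
          rw [hp, ← ih (2 * cs'.length + 1) (by simp only [List.length_cons, List.length_nil] at hm ⊢; omega)
            cs' [c] (List.isChain_singleton _) rfl]
          simp
      | cons t rest =>
          by_cases hc : vocab.contains (t ++ c) = true
          · -- merge case: the leftmost valid pair is (t, c), at index rest.length
            have hrev : (t :: rest).reverse = rest.reverse ++ [t] := by simp
            obtain ⟨tl, htl⟩ := pvValidMerges_head (l := rest.reverse) (hrev ▸ hnp) hc cs' 0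
            have hnprest : NoPair vocab rest.reverse :=
              (List.isChain_append.mp (hrev ▸ hnp)).1
            have harr : (t :: rest).reverse ++ c :: cs' = rest.reverse ++ t :: c :: cs' := by simp
            rw [harr, pvBPELoop]
            split
            · next h => rw [htl] at h; exact absurd h (by simp)
            · next pos merged tl2 h =>
                rw [htl] at h
                obtain ⟨hh, -⟩ := List.cons.inj h
                obtain ⟨hpos, hmerged⟩ := Prod.mk.inj hh
                subst hpos
                subst hmerged
                show pvBPELoop vocab (_ ++ [t ++ c] ++ _) = _
                have htake : (rest.reverse ++ t :: c :: cs').take (0 + rest.reverse.length) =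
                    rest.reverse := List.take_left' (by omega)
                have heq : rest.reverse ++ t :: c :: cs' = (rest.reverse ++ [t, c]) ++ cs' := by simp
                have hdrop : (rest.reverse ++ t :: c :: cs').drop (0 + rest.reverse.length + 2) =
                    cs' := by
                  rw [heq]; exact List.drop_left' (by simp)
                rw [htake, hdrop]
                have hmain := ih (2 * ((t ++ c) :: cs').length + rest.length)
                  (by simp only [List.length_cons] at hm ⊢; omega)
                  ((t ++ c) :: cs') rest hnprest rfl
                rw [show rest.reverse ++ [t ++ c] ++ cs' = rest.reverse ++ (t ++ c) :: cs' by simp,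
                  hmain]
                simp only [List.foldl_cons, pvStackPush, hc, if_true]
          · -- push case: the new top pair is invalid, the stack invariant is preserved
            have hc' : vocab.contains (t ++ c) = false := by
              cases h : vocab.contains (t ++ c) with
              | true => exact absurd h hc
              | false => rfl
            have hnp' : NoPair vocab (c :: t :: rest).reverse := by
              have hr2 : (c :: t :: rest).reverse = (t :: rest).reverse ++ [c] := by simp
              rw [hr2]
              refine List.isChain_append.mpr ⟨hnp, (List.isChain_singleton _), ?_⟩
              intro x hx y hy
              simp only [List.head?_cons, Option.mem_def, Option.some.injEq] at hy
              have hlast : (t :: rest).reverse.getLast? = some t := by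
                simp [List.getLast?_reverse]
              rw [hlast] at hx
              simp only [Option.mem_def, Option.some.injEq] at hx
              subst hx; subst hy
              exact hc'
            have harr : (t :: rest).reverse ++ c :: cs' = (c :: t :: rest).reverse ++ cs' := by simp
            rw [harr, ih (2 * cs'.length + (c :: t :: rest).length)
              (by simp only [List.length_cons] at hm ⊢; omega) cs' (c :: t :: rest) hnp' rfl]
            simp only [List.foldl_cons, pvStackPush, hc', Bool.false_eq_true, if_false]

theorem perWord (vocab : List String) (w : List String) :
    pvBPELoop vocab w = (w.foldl (pvStackPush vocab) []).reverse := by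
  simpa using pvStackPush_main vocab w [] List.isChain_nil

-- ===== VERDICT (by name: the statement is the Claim_ definition above) =====
theorem spacelessBPETokenize_spec : Claim_equal_spacelessBPETokenize := by
  intro text vocab _
  unfold Spec_spacelessBPETokenize spacelessBPETokenize spacelessBPETokenize_alt
  simp only [perWord]
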